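-- pv_equiv track=rewrite | github.com/Archi6828/Python-Projects | Major Data Types and Iteration/fa.py | fa_as_str
-- ===== SOURCE A (Python) =====
-- def fa_as_str(fa : {str:{str:str}}) -> str:
--     for k,v in fa.items():
--         sort_fa = sorted([(k,(num,word)) for k,v in fa.items() for num,word in v.items()],  key = lambda x: x[1][0])
--     s = ''
--     for k in sorted(fa.keys()):
--         s += "  " + str(k) +" transitions: ["
--         for key in sort_fa:
--             if key[0] == k:
--                 s += str(key[1]) + ", "
--         s = s[:-2]
--         s += "]\n"
--     return s
-- ===== SOURCE B (Python) =====
-- def fa_as_str(fa : {str:{str:str}}) -> str: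
--     # sort ALL transitions once, group them by state in one pass, then emit lines
--     trans = sorted([(k, t) for k, v in fa.items() for t in v.items()],
--                    key=lambda p: p[1][0])
--     buckets = {k: [] for k in fa}
--     for k, t in trans:
--         buckets[k].append(t)
--     out = []
--     for k in sorted(buckets):
--         line = "  " + k + " transitions: [" + "".join(str(t) + ", " for t in buckets[k])
--         out.append(line[:-2] + "]\n")
--     return "".join(out)
-- ===== Notes on version B (the rewrite author's own statement) =====
-- stated objective: faster
-- what changed: A re-sorts the full transition list once per dict item and then rescans the whole sorted list once per state; B sorts the transitions once, groups them by state into a dict in a single pass, and joins the per-state lines at the end.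
import Mathlib
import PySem

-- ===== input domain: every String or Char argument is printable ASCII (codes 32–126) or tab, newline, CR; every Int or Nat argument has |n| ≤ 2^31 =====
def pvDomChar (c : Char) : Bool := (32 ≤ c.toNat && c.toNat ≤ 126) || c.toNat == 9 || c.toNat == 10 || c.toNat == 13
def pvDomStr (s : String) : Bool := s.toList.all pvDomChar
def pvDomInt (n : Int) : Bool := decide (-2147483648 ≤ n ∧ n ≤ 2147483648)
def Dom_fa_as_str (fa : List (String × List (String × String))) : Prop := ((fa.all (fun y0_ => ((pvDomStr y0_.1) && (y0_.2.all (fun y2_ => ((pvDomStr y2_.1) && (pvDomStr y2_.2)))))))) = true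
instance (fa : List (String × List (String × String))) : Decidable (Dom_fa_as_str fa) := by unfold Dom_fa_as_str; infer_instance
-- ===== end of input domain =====

-- B sorts the transition list once and groups it by state in a single pass (instead of A's per-state
-- rescan of the globally sorted list and per-item re-sorting); same output, fewer passes.

-- ===== PORT A =====
-- shared helper of both ports: Python's repr() of a str, exact on the ASCII domain above
-- (quote choice: ' unless the string contains ' and no "; escapes \\, the quote, \t, \n, \r)
def pyReprChars (cs : List Char) : List Char :=
  let q : Char := if cs.contains '\'' && !(cs.contains '"') then '"' else '\''
  q :: (cs.flatMap (fun c =>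
    if c = '\\' || c = q then ['\\', c]
    else if c = '\t' then ['\\', 't']
    else if c = '\n' then ['\\', 'n']
    else if c = '\r' then ['\\', 'r']
    else [c])) ++ [q]

-- shared helper of both ports: Python's str() of a pair of strings: "('a', 'q1')"
def pyStrPair (t : String × String) : List Char :=
  ['('] ++ pyReprChars t.1.toList ++ [',', ' '] ++ pyReprChars t.2.toList ++ [')']

-- A's first loop rebinds sort_fa to the same value once per item of fa; ported as one binding
-- (when fa = [] Python leaves sort_fa unbound, but the output loop is then empty too, so '' either way).
def fa_as_str (fa : List (String × List (String × String))) : String :=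
  let sortFa := PySem.List.sorted
      (fa.flatMap (fun kv => kv.2.map (fun t => (kv.1, t)))) (fun x => x.2.1) false
  String.ofList <|
    (PySem.List.sorted (fa.map (fun kv => kv.1)) (fun k => k) false).foldl (fun s k =>
      let s := s ++ ([' ', ' '] ++ k.toList ++ " transitions: [".toList)
      let s := sortFa.foldl (fun s key =>
        if key.1 == k then s ++ (pyStrPair key.2 ++ [',', ' ']) else s) s
      PySem.List.slice s none (some (-2)) ++ [']', '\n']) []

-- ===== PORT B =====
def fa_as_str_alt (fa : List (String × List (String × String))) : String :=
  let trans := PySem.List.sorted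
      (fa.flatMap (fun kv => kv.2.map (fun t => (kv.1, t)))) (fun p => p.2.1) false
  let buckets0 : PySem.Dict String (List (String × String)) :=
    fa.foldl (fun d kv => d.insert kv.1 []) PySem.Dict.empty
  -- buckets[k].append(t): every k of trans is a key of buckets, so Python never raises
  -- and Dict.modify's default [] is never used
  let buckets := trans.foldl (fun d p => d.modify p.1 [] (fun x => x ++ [p.2])) buckets0
  let out : List (List Char) :=
    (PySem.List.sorted buckets.keys (fun k => k) false).foldl (fun out k =>
      let line := [' ', ' '] ++ k.toList ++ " transitions: [".toList
        ++ (buckets.getD k []).flatMap (fun t => pyStrPair t ++ [',', ' '])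
      out ++ [PySem.List.slice line none (some (-2)) ++ [']', '\n']]) []
  String.ofList (PySem.Chars.join [] out)

-- ===== PRECONDITION & SPEC =====
-- Pre_ excludes association lists with duplicate state keys, which no Python dict can present
-- (a defensible-corner artefact of the dict→list convention: A would list such a state twice,
-- B's grouping dict merges it once).
def Pre_fa_as_str (fa : List (String × List (String × String))) : Prop :=
  (fa.map (fun kv => kv.1)).Nodup
instance (fa : List (String × List (String × String))) : Decidable (Pre_fa_as_str fa) := by
  unfold Pre_fa_as_str; infer_instance

def pvWitness_fa_as_str : (List (String × List (String × String))) :=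
  [("q0", [("a", "q1"), ("b", "q0")]), ("q1", [("a", "q0")])]

def Spec_fa_as_str (fa : List (String × List (String × String))) (out : String) : Prop :=
  out = fa_as_str_alt fa
instance (fa : List (String × List (String × String))) (out : String) :
    Decidable (Spec_fa_as_str fa out) := by unfold Spec_fa_as_str; infer_instance

-- ===== CLAIM (what is proved, stated in full; the proofs are below) =====
def Claim_equal_fa_as_str : Prop := ∀ (fa : List (String × List (String × String))),
  Dom_fa_as_str fa → Pre_fa_as_str fa → Spec_fa_as_str fa (fa_as_str fa)

-- ===== LEMMAS AND PROOFS =====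

-- ''.join over List Char is flatten
theorem pv_join_nil_flatten (out : List (List Char)) :
    PySem.Chars.join [] out = out.flatten := by
  induction out with
  | nil => simp [PySem.Chars.join_nil]
  | cons p rest ih =>
      cases rest with
      | nil => simp [PySem.Chars.join_singleton]
      | cons q r =>
          rw [PySem.Chars.join_cons_cons]
          simp [ih]

-- a fold that conditionally appends blocks is append-of-filtered-flatMap
theorem pv_foldl_append_if_flat {α : Type} (p : α → Bool) (g : α → List Char)
    (l : List α) (acc : List Char) :
    l.foldl (fun acc x => if p x then acc ++ g x else acc) acc
      = acc ++ (l.filter p).flatMap g := by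
  induction l generalizing acc with
  | nil => simp
  | cons x t ih =>
      by_cases hx : p x
      · simp [hx, ih]
      · simp [hx, ih]

-- s[:-2] of an accumulator ++ a block of length ≥ 2 strips inside the block
theorem pv_slice_neg2_append (a b : List Char) (h : 2 ≤ b.length) :
    PySem.List.slice (a ++ b) none (some (-2))
      = a ++ PySem.List.slice b none (some (-2)) := by
  rw [PySem.List.slice_to_neg_ofNat _ 2 (by omega),
      PySem.List.slice_to_neg_ofNat _ 2 (by omega)]
  rw [List.length_append, show a.length + b.length - 2 = a.length + (b.length - 2) by omega]
  exact List.take_length_add_append (b.length - 2) -- take (a.len + n) (a ++ b) = a ++ take n b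

-- the {k: [] for k in fa} dict looks up to [] at every key
theorem pv_buckets0_getD (l : List (String × List (String × String)))
    (d : PySem.Dict String (List (String × String))) (hd : ∀ k, d.getD k [] = []) (k : String) :
    (l.foldl (fun d kv => d.insert kv.1 []) d).getD k [] = [] := by
  induction l generalizing d with
  | nil => exact hd k
  | cons kv t ih =>
      simp only [List.foldl_cons]
      exact ih _ (fun k' => by rw [PySem.Dict.getD_insert]; split <;> simp [hd])

theorem pv_empty_getD (k : String) :
    (PySem.Dict.empty : PySem.Dict String (List (String × String))).getD k [] = [] := by
  simp [PySem.Dict.empty, PySem.Dict.getD, PySem.Dict.get?]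

theorem pv_set_update_of_mem (s : PySem.Set String) (l : List String)
    (h : ∀ x ∈ l, x ∈ s) : PySem.Set.update s l = s := by
  induction l generalizing s with
  | nil => exact PySem.Set.update_nil s
  | cons x t ih =>
      simp only [PySem.Set.update]
      rw [show List.foldl PySem.Set.add s (x :: t) = List.foldl PySem.Set.add (s.add x) t from rfl,
          PySem.Set.add_of_mem (h x (by simp))]
      exact ih s (fun y hy => h y (by simp [hy]))

theorem pv_mem_trans_fst (fa : List (String × List (String × String))) (p : String × (String × String))
    (h : p ∈ fa.flatMap (fun kv => kv.2.map (fun t => (kv.1, t)))) :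
    p.1 ∈ fa.map (fun kv => kv.1) := by
  simp only [List.mem_flatMap, List.mem_map] at *
  obtain ⟨kv, hkv, t, ht, rfl⟩ := h
  exact ⟨kv, hkv, rfl⟩

-- B's grouping dict: its keys are exactly A's key list (under Nodup), its buckets are
-- exactly A's per-state filters of the globally sorted transition list
theorem pv_buckets_getD (fa : List (String × List (String × String))) (k : String) :
    ((PySem.List.sorted (fa.flatMap (fun kv => kv.2.map (fun t => (kv.1, t))))
        (fun p => p.2.1) false).foldl (fun d p => d.modify p.1 [] (fun x => x ++ [p.2]))
        (fa.foldl (fun d kv => d.insert kv.1 []) PySem.Dict.empty)).getD k []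
      = ((PySem.List.sorted (fa.flatMap (fun kv => kv.2.map (fun t => (kv.1, t))))
          (fun p => p.2.1) false).filter (fun p => p.1 == k)).map (fun p => p.2) := by
  rw [PySem.Dict.getD_foldl_modify_append]
  rw [pv_buckets0_getD _ _ pv_empty_getD]
  simp

theorem pv_buckets_keys (fa : List (String × List (String × String)))
    (h : (fa.map (fun kv => kv.1)).Nodup) :
    ((PySem.List.sorted (fa.flatMap (fun kv => kv.2.map (fun t => (kv.1, t))))
        (fun p => p.2.1) false).foldl (fun d p => d.modify p.1 [] (fun x => x ++ [p.2]))
        (fa.foldl (fun d kv => d.insert kv.1 []) PySem.Dict.empty)).keys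
      = fa.map (fun kv => kv.1) := by
  have h1 := PySem.Dict.keys_foldl_modify_key
    (PySem.List.sorted (fa.flatMap (fun kv => kv.2.map (fun t => (kv.1, t))))
      (fun p => p.2.1) false) (fun p => p.1) [] (fun _ p x => x ++ [p.2])
    (fa.foldl (fun d kv => d.insert kv.1 []) PySem.Dict.empty)
  have h2 := PySem.Dict.keys_foldl_insert_key fa (fun kv => kv.1) (fun _ _ => [])
    (PySem.Dict.empty : PySem.Dict String (List (String × String)))
  simp only [] at h1 h2
  rw [h1, h2]
  rw [show (PySem.Dict.empty : PySem.Dict String (List (String × String))).keys = [] from rfl]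
  rw [PySem.Set.update_nil_left, PySem.Set.ofList_eq_self_of_nodup _ h]
  apply pv_set_update_of_mem
  intro x hx
  simp only [List.mem_map] at hx
  obtain ⟨p, hp, rfl⟩ := hx
  exact pv_mem_trans_fst fa p ((PySem.List.sorted_perm _ _ _).mem_iff.mp hp)

-- per-state pieces (proof-only helpers)
def pvPre (k : String) : List Char := [' ', ' '] ++ k.toList ++ " transitions: [".toList

def pvLine (sF : List (String × (String × String))) (k : String) : List Char :=
  PySem.List.slice (pvPre k ++ (sF.filter (fun p => p.1 == k)).flatMap
      (fun key => pyStrPair key.2 ++ [',', ' '])) none (some (-2)) ++ [']', '\n']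

theorem pv_A_step (sF : List (String × (String × String))) (s : List Char) (k : String) :
    PySem.List.slice (sF.foldl (fun s key =>
        if key.1 == k then s ++ (pyStrPair key.2 ++ [',', ' ']) else s) (s ++ pvPre k))
        none (some (-2)) ++ [']', '\n']
      = s ++ pvLine sF k := by
  rw [pv_foldl_append_if_flat (fun key => key.1 == k)
        (fun key => pyStrPair key.2 ++ [',', ' ']) sF (s ++ pvPre k)]
  rw [List.append_assoc, pv_slice_neg2_append s _ (by simp [pvPre])]
  simp [pvLine]

-- ===== VERDICT (by name: the statement is the Claim_ definition above) =====
theorem fa_as_str_spec : Claim_equal_fa_as_str := by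
  intro fa _hDom hPre
  unfold Spec_fa_as_str fa_as_str fa_as_str_alt
  simp only []
  rw [pv_buckets_keys fa hPre]
  congr 1
  rw [pv_join_nil_flatten]
  -- A's fold appends one line per state; B's collects the same lines and flattens
  have hA : ∀ (ks : List String),
      ks.foldl (fun s k =>
        PySem.List.slice ((PySem.List.sorted (fa.flatMap (fun kv => kv.2.map (fun t => (kv.1, t))))
            (fun x => x.2.1) false).foldl (fun s key =>
              if key.1 == k then s ++ (pyStrPair key.2 ++ [',', ' ']) else s)
            (s ++ ([' ', ' '] ++ k.toList ++ " transitions: [".toList)))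
          none (some (-2)) ++ [']', '\n']) []
      = ks.flatMap (pvLine (PySem.List.sorted (fa.flatMap (fun kv => kv.2.map (fun t => (kv.1, t))))
          (fun x => x.2.1) false)) := by
    intro ks
    have hstep : (fun (s : List Char) (k : String) =>
        PySem.List.slice ((PySem.List.sorted (fa.flatMap (fun kv => kv.2.map (fun t => (kv.1, t))))
            (fun x => x.2.1) false).foldl (fun s key =>
              if key.1 == k then s ++ (pyStrPair key.2 ++ [',', ' ']) else s)
            (s ++ ([' ', ' '] ++ k.toList ++ " transitions: [".toList)))
          none (some (-2)) ++ [']', '\n'])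
        = (fun s k => s ++ pvLine (PySem.List.sorted
            (fa.flatMap (fun kv => kv.2.map (fun t => (kv.1, t)))) (fun x => x.2.1) false) k) := by
      funext s k
      exact pv_A_step _ s k
    rw [hstep, PySem.List.foldl_append_eq_flatMap]
    simp
  have hB : ∀ (ks : List String),
      (ks.foldl (fun out k => out ++
        [PySem.List.slice ([' ', ' '] ++ k.toList ++ " transitions: [".toList
          ++ (((PySem.List.sorted (fa.flatMap (fun kv => kv.2.map (fun t => (kv.1, t))))
              (fun p => p.2.1) false).foldl (fun d p => d.modify p.1 [] (fun x => x ++ [p.2]))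
              (fa.foldl (fun d kv => d.insert kv.1 []) PySem.Dict.empty)).getD k []).flatMap
              (fun t => pyStrPair t ++ [',', ' '])) none (some (-2)) ++ [']', '\n']]) []).flatten
      = ks.flatMap (pvLine (PySem.List.sorted (fa.flatMap (fun kv => kv.2.map (fun t => (kv.1, t))))
          (fun x => x.2.1) false)) := by
    intro ks
    have hstep : (fun (out : List (List Char)) (k : String) => out ++
        [PySem.List.slice ([' ', ' '] ++ k.toList ++ " transitions: [".toList
          ++ (((PySem.List.sorted (fa.flatMap (fun kv => kv.2.map (fun t => (kv.1, t))))
              (fun p => p.2.1) false).foldl (fun d p => d.modify p.1 [] (fun x => x ++ [p.2]))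
              (fa.foldl (fun d kv => d.insert kv.1 []) PySem.Dict.empty)).getD k []).flatMap
              (fun t => pyStrPair t ++ [',', ' '])) none (some (-2)) ++ [']', '\n']])
        = (fun out k => out ++ [pvLine (PySem.List.sorted
            (fa.flatMap (fun kv => kv.2.map (fun t => (kv.1, t)))) (fun x => x.2.1) false) k]) := by
      funext out k
      rw [pv_buckets_getD fa k]
      simp only [pvLine, pvPre, List.append_assoc]
      congr 3
      simp [List.flatMap_def, List.map_map]
      rfl
    rw [hstep, PySem.List.foldl_append_singleton_eq_map]
    simp [List.flatMap_def]
  rw [hA, hB]
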